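-- pv_equiv track=rewrite | github.com/HomoYouDidnt/kloros | scripts/deduplicate_semantic_evidence.py | select_best_capability
-- ===== SOURCE A (Python) =====
-- from typing import List, Tuple, Set
--
-- def select_best_capability(capabilities: List[str], indices: Set[int]) -> str:
--     """
--     Select the best capability from a group of similar ones.
--
--     Prefers:
--     1. Longest description (most informative)
--     2. More specific language (contains ":", numbers, technical terms)
--     """
--     candidates = [(i, capabilities[i]) for i in indices]
--
--     # Score each candidate
--     scores = []
--     for i, cap in candidates:
--         score = len(cap)  # Base score: length
--
--         # Bonus for structure markers
--         if ':' in cap: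
--             score += 20
--         if any(char.isdigit() for char in cap):
--             score += 10
--
--         # Penalty for vague words
--         vague_words = ['handles', 'manages', 'provides', 'supports']
--         if any(word in cap.lower() for word in vague_words):
--             score -= 5
--
--         scores.append((score, i, cap))
--
--     # Return highest scoring capability
--     scores.sort(reverse=True)
--     return scores[0][2]
-- ===== SOURCE B (Python) =====
-- # Single-pass selection: instead of scoring into a list and reverse-sorting,
-- # keep a running best (score, i, cap) tuple and replace it on a strictly
-- # greater tuple; ties in the full tuple ordering match reverse-sort's winner.
-- _VAGUE = ("handles", "manages", "provides", "supports")
--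
-- def select_best_capability(capabilities, indices):
--     best = None
--     for i in indices:
--         cap = capabilities[i]
--         low = cap.lower()
--         score = (len(cap)
--                  + (20 if ":" in cap else 0)
--                  + (10 if any(c.isdigit() for c in cap) else 0)
--                  - (5 if any(w in low for w in _VAGUE) else 0))
--         cand = (score, i, cap)
--         if best is None or cand > best:
--             best = cand
--     return best[2]
-- ===== Notes on version B (the rewrite author's own statement) =====
-- stated objective: faster
-- what changed: B keeps a single running best (score, i, cap) tuple updated in one pass under full tuple comparison instead of materialising a score list and reverse-sorting it, and folds the score bonuses into one arithmetic expression.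
import Mathlib
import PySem

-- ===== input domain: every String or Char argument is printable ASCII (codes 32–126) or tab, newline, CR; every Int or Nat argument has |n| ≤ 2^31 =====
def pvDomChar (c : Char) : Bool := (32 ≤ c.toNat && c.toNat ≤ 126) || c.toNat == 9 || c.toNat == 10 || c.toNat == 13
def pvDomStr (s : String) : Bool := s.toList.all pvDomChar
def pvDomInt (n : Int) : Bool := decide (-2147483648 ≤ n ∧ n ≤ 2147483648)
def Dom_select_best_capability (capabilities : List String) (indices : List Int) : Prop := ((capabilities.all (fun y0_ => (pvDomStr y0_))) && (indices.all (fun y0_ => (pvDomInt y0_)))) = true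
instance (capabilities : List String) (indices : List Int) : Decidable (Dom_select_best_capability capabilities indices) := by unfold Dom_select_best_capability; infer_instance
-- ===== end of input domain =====

-- B replaces A's build-score-list-then-reverse-sort with a single-pass running best (score, i, cap) tuple.

-- ===== PORT A =====
-- Note on the sort: Python sorts the (score, i, cap) triples by full tuple order, but two
-- triples with equal (score, i) are entirely equal (they come from the same index i), so the
-- stable two-key sort on (score, i) produces the identical list; it is exact here.
def select_best_capability (capabilities : List String) (indices : List Int) : String :=
  let candidates : List (Int × String) :=
    indices.map (fun i => (i, PySem.List.pyGetD capabilities i ""))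
  let scores : List (Int × Int × String) :=
    candidates.foldl (fun acc p =>
      let score : Int := PySem.Str.len p.2
      let score := if PySem.Str.isIn ":" p.2 then score + 20 else score
      let score := if p.2.toList.any PySem.Chars.isdigit then score + 10 else score
      let score := if ["handles", "manages", "provides", "supports"].any
          (fun w => PySem.Str.isIn w (PySem.Str.lower p.2)) then score - 5 else score
      acc ++ [(score, p.1, p.2)]) []
  let sortedScores := PySem.List.sorted2 scores (fun t => t.1) (fun t => t.2.1) true
  (PySem.List.pyGetD sortedScores 0 (0, 0, "")).2.2

-- ===== PORT B =====
-- Python tuple comparison cand > best, lexicographic on (score, i, cap)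
def pyTupGt (a b : Int × Int × String) : Bool :=
  decide (b.1 < a.1) ||
    (a.1 == b.1 && (decide (b.2.1 < a.2.1) ||
      (a.2.1 == b.2.1 && decide (b.2.2 < a.2.2))))

-- B's loop body: the scored candidate triple for index i
def pvCandB (capabilities : List String) (i : Int) : Int × Int × String :=
  let cap := PySem.List.pyGetD capabilities i ""
  let low := PySem.Str.lower cap
  let score : Int := PySem.Str.len cap
      + (if PySem.Str.isIn ":" cap then 20 else 0)
      + (if cap.toList.any PySem.Chars.isdigit then 10 else 0)
      - (if ["handles", "manages", "provides", "supports"].any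
          (fun w => PySem.Str.isIn w low) then 5 else 0)
  (score, i, cap)

def select_best_capability_alt (capabilities : List String) (indices : List Int) : String :=
  let best := indices.foldl (fun best i =>
    let cand := pvCandB capabilities i
    match best with
    | none => some cand
    | some b => if pyTupGt cand b then some cand else some b) none
  match best with
  | some b => b.2.2
  | none => ""   -- unreachable under Pre_ (the Python B raises on empty indices, as A does)

-- ===== PRECONDITION & SPEC =====
-- Pre_ excludes exactly the inputs where Python A raises: empty indices (IndexError on
-- scores[0]) and indices outside -len(capabilities)..len(capabilities)-1 (IndexError).
def Pre_select_best_capability (capabilities : List String) (indices : List Int) : Prop :=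
  indices ≠ [] ∧ ∀ i ∈ indices, -(capabilities.length : Int) ≤ i ∧ i < (capabilities.length : Int)
instance (capabilities : List String) (indices : List Int) : Decidable (Pre_select_best_capability capabilities indices) := by unfold Pre_select_best_capability; infer_instance

def pvWitness_select_best_capability : List String × List Int := (["db: stores 3 rows", "handles stuff"], [0, 1, -1])

def Spec_select_best_capability (capabilities : List String) (indices : List Int) (out : String) : Prop := out = select_best_capability_alt capabilities indices
instance (capabilities : List String) (indices : List Int) (out : String) : Decidable (Spec_select_best_capability capabilities indices out) := by unfold Spec_select_best_capability; infer_instance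

-- ===== CLAIM (what is proved, stated in full; the proofs are below) =====
def Claim_equal_select_best_capability : Prop := ∀ (capabilities : List String) (indices : List Int), Dom_select_best_capability capabilities indices → Pre_select_best_capability capabilities indices → Spec_select_best_capability capabilities indices (select_best_capability capabilities indices)

-- ===== LEMMAS AND PROOFS =====

-- lexicographic ≤ on the first two components (the keys A's sort uses)
def pvLe2 (a b : Int × Int × String) : Prop :=
  a.1 < b.1 ∨ (a.1 = b.1 ∧ a.2.1 ≤ b.2.1)

-- lexicographic ≤ on the full triple (the order B's running best uses)
def pvLe3 (a b : Int × Int × String) : Prop :=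
  a.1 < b.1 ∨ (a.1 = b.1 ∧ (a.2.1 < b.2.1 ∨ (a.2.1 = b.2.1 ∧ a.2.2 ≤ b.2.2)))

-- the comparison sorted2 … true actually inserts with (descending two-key order)
def pvBef (a b : Int × Int × String) : Bool :=
  decide (b.1 < a.1) || (!decide (a.1 < b.1) && decide (b.2.1 < a.2.1))

lemma pvLe2_refl (a : Int × Int × String) : pvLe2 a a := by unfold pvLe2; omega

lemma pvLe2_trans (a b c : Int × Int × String) (h1 : pvLe2 a b) (h2 : pvLe2 b c) :
    pvLe2 a c := by unfold pvLe2 at *; omega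

lemma pvLe3_refl (a : Int × Int × String) : pvLe3 a a :=
  Or.inr ⟨rfl, Or.inr ⟨rfl, le_refl _⟩⟩

lemma pvLe3_trans (a b c : Int × Int × String) (h1 : pvLe3 a b) (h2 : pvLe3 b c) :
    pvLe3 a c := by
  unfold pvLe3 at *
  rcases h1 with h1 | ⟨e1, h1⟩
  · rcases h2 with h2 | ⟨e2, _⟩
    · exact Or.inl (lt_trans h1 h2)
    · exact Or.inl (e2 ▸ h1)
  · rcases h2 with h2 | ⟨e2, h2⟩
    · exact Or.inl (e1 ▸ h2)
    · refine Or.inr ⟨e1.trans e2, ?_⟩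
      rcases h1 with h1 | ⟨f1, h1⟩
      · rcases h2 with h2 | ⟨f2, _⟩
        · exact Or.inl (lt_trans h1 h2)
        · exact Or.inl (f2 ▸ h1)
      · rcases h2 with h2 | ⟨f2, h2⟩
        · exact Or.inl (f1 ▸ h2)
        · exact Or.inr ⟨f1.trans f2, le_trans h1 h2⟩

lemma pvLe3_le2 {a b : Int × Int × String} (h : pvLe3 a b) : pvLe2 a b := by
  unfold pvLe3 at h; unfold pvLe2
  rcases h with h | ⟨h1, h | ⟨h2, _⟩⟩
  · exact Or.inl h
  · exact Or.inr ⟨h1, le_of_lt h⟩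
  · exact Or.inr ⟨h1, le_of_eq h2⟩

lemma pvBef_true {x y : Int × Int × String} (h : pvBef x y = true) : pvLe2 y x := by
  simp [pvBef] at h; unfold pvLe2; omega

lemma pvBef_false {x y : Int × Int × String} (h : pvBef x y = false) : pvLe2 x y := by
  simp [pvBef] at h; unfold pvLe2; omega

lemma pyTupGt_true {x y : Int × Int × String} (h : pyTupGt x y = true) : pvLe3 y x := by
  unfold pyTupGt at h
  simp only [Bool.or_eq_true, Bool.and_eq_true, decide_eq_true_eq, beq_iff_eq] at h
  unfold pvLe3
  rcases h with h | ⟨h1, h | ⟨h2, h3⟩⟩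
  · exact Or.inl h
  · exact Or.inr ⟨h1.symm, Or.inl h⟩
  · exact Or.inr ⟨h1.symm, Or.inr ⟨h2.symm, le_of_lt h3⟩⟩

lemma pyTupGt_false {x y : Int × Int × String} (h : pyTupGt x y = false) : pvLe3 x y := by
  unfold pvLe3
  rcases lt_trichotomy x.1 y.1 with h1 | h1 | h1
  · exact Or.inl h1
  · refine Or.inr ⟨h1, ?_⟩
    rcases lt_trichotomy x.2.1 y.2.1 with h2 | h2 | h2
    · exact Or.inl h2
    · refine Or.inr ⟨h2, ?_⟩
      by_contra hlt
      push Not at hlt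
      unfold pyTupGt at h
      rw [h1, h2] at h
      simp only [lt_self_iff_false, decide_false, beq_self_eq_true, Bool.false_or,
        Bool.true_and, decide_eq_false_iff_not] at h
      exact h hlt
    · exfalso
      unfold pyTupGt at h
      rw [h1, decide_eq_true h2] at h
      simp at h
  · exfalso
    unfold pyTupGt at h
    rw [decide_eq_true h1] at h
    simp at h

-- head of a foldl-insertBy sort is maximal, for any `bef` deciding a total preorder `le`
lemma pv_foldl_insertBy_head_max {α : Type} (bef : α → α → Bool) (le : α → α → Prop)
    (hrefl : ∀ a, le a a) (htrans : ∀ a b c, le a b → le b c → le a c)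
    (hT : ∀ x y, bef x y = true → le y x) (hF : ∀ x y, bef x y = false → le x y) :
    ∀ (xs acc : List α),
      (∀ h t, acc = h :: t → ∀ y ∈ acc, le y h) →
      ∀ h t, xs.foldl (fun a x => PySem.List.insertBy bef x a) acc = h :: t →
        (∀ y ∈ xs, le y h) ∧ (∀ y ∈ acc, le y h) ∧ (h ∈ xs ∨ h ∈ acc) := by
  intro xs
  induction xs with
  | nil =>
    intro acc hacc h t hf
    simp only [List.foldl_nil] at hf
    exact ⟨by simp, hacc h t hf, Or.inr (hf ▸ List.mem_cons_self ..)⟩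
  | cons x xs ih =>
    intro acc hacc h t hf
    simp only [List.foldl_cons] at hf
    have hins_nil : PySem.List.insertBy bef x [] = [x] := rfl
    have hins_cons : ∀ (a : α) (as : List α), PySem.List.insertBy bef x (a :: as) =
        if bef x a then x :: a :: as else a :: PySem.List.insertBy bef x as := fun a as => rfl
    have hacc' : ∀ h' t', PySem.List.insertBy bef x acc = h' :: t' →
        ∀ y ∈ PySem.List.insertBy bef x acc, le y h' := by
      cases acc with
      | nil =>
        intro h' t' he y hy
        rw [hins_nil] at he hy
        injection he with e1 _
        subst e1
        simp at hy
        subst hy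
        exact hrefl _
      | cons a as =>
        intro h' t' he y hy
        rw [hins_cons] at he hy
        by_cases hb : bef x a = true
        · rw [if_pos hb] at he hy
          injection he with e1 _
          subst e1
          rcases List.mem_cons.mp hy with rfl | hy2
          · exact hrefl _
          · exact htrans _ _ _ (hacc a as rfl y hy2) (hT x a hb)
        · rw [if_neg hb] at he hy
          injection he with e1 _
          subst e1
          rcases List.mem_cons.mp hy with rfl | hy2
          · exact hrefl _
          · rcases (PySem.List.mem_insertBy bef x y as).mp hy2 with rfl | hy3
            · exact hF _ _ (by simpa using hb)
            · exact hacc a as rfl y (List.mem_cons_of_mem a hy3)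
    obtain ⟨hxs, hacc2, hmem⟩ := ih (PySem.List.insertBy bef x acc) hacc' h t hf
    refine ⟨?_, ?_, ?_⟩
    · intro y hy
      rcases List.mem_cons.mp hy with rfl | hy2
      · exact hacc2 y ((PySem.List.mem_insertBy bef y y acc).mpr (Or.inl rfl))
      · exact hxs y hy2
    · intro y hy
      exact hacc2 y ((PySem.List.mem_insertBy bef x y acc).mpr (Or.inr hy))
    · rcases hmem with h1 | h2
      · exact Or.inl (List.mem_cons_of_mem x h1)
      · rcases (PySem.List.mem_insertBy bef x h acc).mp h2 with rfl | h3
        · exact Or.inl (List.mem_cons_self ..)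
        · exact Or.inr h3

lemma pvSorted2_head_max (xs : List (Int × Int × String)) (m : Int × Int × String)
    (t : List (Int × Int × String))
    (h : PySem.List.sorted2 xs (fun t => t.1) (fun t => t.2.1) true = m :: t) :
    m ∈ xs ∧ ∀ y ∈ xs, pvLe2 y m := by
  have h' : xs.foldl (fun acc x => PySem.List.insertBy pvBef x acc) [] = m :: t := h
  obtain ⟨hxs, _, hmem⟩ := pv_foldl_insertBy_head_max pvBef pvLe2 pvLe2_refl pvLe2_trans
    (fun x y hb => pvBef_true hb) (fun x y hb => pvBef_false hb) xs []
    (by intro h t he; cases he) m t h'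
  refine ⟨?_, hxs⟩
  rcases hmem with h1 | h2
  · exact h1
  · cases h2

-- B's running-best fold returns a pvLe3-maximum of the processed candidates
lemma pv_foldl_best_max (f : Int → Int × Int × String) :
    ∀ (l : List Int) (acc : Option (Int × Int × String)) (b : Int × Int × String),
      l.foldl (fun a i =>
        match a with
        | none => some (f i)
        | some b0 => if pyTupGt (f i) b0 then some (f i) else some b0) acc = some b →
      ((∃ i ∈ l, b = f i) ∨ acc = some b) ∧ (∀ i ∈ l, pvLe3 (f i) b) ∧
        (∀ b0, acc = some b0 → pvLe3 b0 b) := by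
  intro l
  induction l with
  | nil =>
    intro acc b hf
    simp only [List.foldl_nil] at hf
    refine ⟨Or.inr hf, by simp, fun b0 h0 => ?_⟩
    rw [hf] at h0
    injection h0 with h0
    exact h0 ▸ pvLe3_refl _
  | cons i l ih =>
    intro acc b hf
    simp only [List.foldl_cons] at hf
    cases acc with
    | none =>
      obtain ⟨ho, hall, haccp⟩ := ih (some (f i)) b hf
      refine ⟨?_, ?_, fun b0 h0 => by cases h0⟩
      · rcases ho with ⟨i', hi', he⟩ | he
        · exact Or.inl ⟨i', List.mem_cons_of_mem _ hi', he⟩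
        · injection he with he
          exact Or.inl ⟨i, List.mem_cons_self .., he.symm⟩
      · intro j hj
        rcases List.mem_cons.mp hj with rfl | hj2
        · exact haccp (f j) rfl
        · exact hall j hj2
    | some b0 =>
      by_cases hgt : pyTupGt (f i) b0 = true
      · have hf' : l.foldl (fun a i =>
            match a with
            | none => some (f i)
            | some b0 => if pyTupGt (f i) b0 then some (f i) else some b0) (some (f i)) = some b := by
          have hstep : (if pyTupGt (f i) b0 then some (f i) else some b0) = some (f i) := if_pos hgt
          exact (by rw [← hstep]; exact hf)
        obtain ⟨ho, hall, haccp⟩ := ih (some (f i)) b hf'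
        refine ⟨?_, ?_, ?_⟩
        · rcases ho with ⟨i', hi', he⟩ | he
          · exact Or.inl ⟨i', List.mem_cons_of_mem _ hi', he⟩
          · injection he with he
            exact Or.inl ⟨i, List.mem_cons_self .., he.symm⟩
        · intro j hj
          rcases List.mem_cons.mp hj with rfl | hj2
          · exact haccp (f j) rfl
          · exact hall j hj2
        · intro b1 h1
          injection h1 with h1
          subst h1
          exact pvLe3_trans _ _ _ (pyTupGt_true hgt) (haccp (f i) rfl)
      · have hgt' : pyTupGt (f i) b0 = false := by simpa using hgt
        have hf' : l.foldl (fun a i =>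
            match a with
            | none => some (f i)
            | some b0 => if pyTupGt (f i) b0 then some (f i) else some b0) (some b0) = some b := by
          have hstep : (if pyTupGt (f i) b0 then some (f i) else some b0) = some b0 := if_neg (by simp [hgt'])
          exact (by rw [← hstep]; exact hf)
        obtain ⟨ho, hall, haccp⟩ := ih (some b0) b hf'
        refine ⟨?_, ?_, ?_⟩
        · rcases ho with ⟨i', hi', he⟩ | he
          · exact Or.inl ⟨i', List.mem_cons_of_mem _ hi', he⟩
          · exact Or.inr he
        · intro j hj
          rcases List.mem_cons.mp hj with rfl | hj2
          · exact pvLe3_trans _ _ _ (pyTupGt_false hgt') (haccp b0 rfl)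
          · exact hall j hj2
        · exact haccp

lemma pv_foldl_best_some (f : Int → Int × Int × String) :
    ∀ (l : List Int) (b0 : Int × Int × String),
      ∃ b, l.foldl (fun a i =>
        match a with
        | none => some (f i)
        | some b0 => if pyTupGt (f i) b0 then some (f i) else some b0) (some b0) = some b := by
  intro l
  induction l with
  | nil => intro b0; exact ⟨b0, rfl⟩
  | cons i l ih =>
    intro b0
    simp only [List.foldl_cons]
    by_cases hgt : pyTupGt (f i) b0 = true
    · show ∃ b, l.foldl _ (if pyTupGt (f i) b0 then some (f i) else some b0) = some b
      rw [if_pos hgt]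
      exact ih (f i)
    · show ∃ b, l.foldl _ (if pyTupGt (f i) b0 then some (f i) else some b0) = some b
      rw [if_neg hgt]
      exact ih b0

lemma pvA_eq_aux (caps : List String) (indices : List Int) (F : Int → Int × Int × String)
    (hF : ∀ i, F i = pvCandB caps i) :
    (PySem.List.pyGetD (PySem.List.sorted2 (indices.map F)
        (fun t => t.1) (fun t => t.2.1) true) 0 (0, 0, "")).2.2
    = (PySem.List.pyGetD (PySem.List.sorted2 (indices.map (pvCandB caps))
        (fun t => t.1) (fun t => t.2.1) true) 0 (0, 0, "")).2.2 := by
  rw [List.map_congr_left (fun i _ => hF i)]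

lemma pvA_eq (caps : List String) (indices : List Int) :
    select_best_capability caps indices =
      (PySem.List.pyGetD (PySem.List.sorted2 (indices.map (pvCandB caps))
        (fun t => t.1) (fun t => t.2.1) true) 0 (0, 0, "")).2.2 := by
  unfold select_best_capability
  simp only [letFun]
  rw [PySem.List.foldl_append_singleton_eq_map, List.map_map]
  simp only [List.nil_append]
  apply pvA_eq_aux
  intro i
  dsimp only [Function.comp_apply, pvCandB]
  split_ifs <;> simp_all

-- ===== VERDICT (by name: the statement is the Claim_ definition above) =====
theorem select_best_capability_spec : Claim_equal_select_best_capability := by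
  intro caps indices _hdom hpre
  unfold Spec_select_best_capability
  obtain ⟨hne, _⟩ := hpre
  obtain ⟨i0, rest, rfl⟩ := List.exists_cons_of_ne_nil hne
  -- B's value
  obtain ⟨b, hb⟩ := pv_foldl_best_some (pvCandB caps) rest (pvCandB caps i0)
  have hfold : (i0 :: rest).foldl (fun a i =>
      match a with
      | none => some (pvCandB caps i)
      | some b0 => if pyTupGt (pvCandB caps i) b0 then some (pvCandB caps i) else some b0)
      none = some b := by
    simp only [List.foldl_cons]
    exact hb
  have hBval : select_best_capability_alt caps (i0 :: rest) = b.2.2 := by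
    show (match (i0 :: rest).foldl (fun a i =>
      match a with
      | none => some (pvCandB caps i)
      | some b0 => if pyTupGt (pvCandB caps i) b0 then some (pvCandB caps i) else some b0)
      none with
      | some b => b.2.2
      | none => "") = b.2.2
    rw [hfold]
  obtain ⟨hoB, hallB, _⟩ := pv_foldl_best_max (pvCandB caps) (i0 :: rest) none b hfold
  have hoB' : ∃ i ∈ i0 :: rest, b = pvCandB caps i := by
    rcases hoB with h | h
    · exact h
    · cases h
  obtain ⟨ib, hib, rfl⟩ := hoB'
  -- A's value
  rw [pvA_eq]
  cases hs : PySem.List.sorted2 ((i0 :: rest).map (pvCandB caps))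
      (fun t => t.1) (fun t => t.2.1) true with
  | nil =>
    exfalso
    have hperm := PySem.List.sorted2_perm ((i0 :: rest).map (pvCandB caps))
      (fun t : Int × Int × String => t.1) (fun t : Int × Int × String => t.2.1) true
    rw [hs] at hperm
    have := hperm.symm.eq_nil
    simp at this
  | cons m t =>
    obtain ⟨hmmem, hmax⟩ := pvSorted2_head_max _ m t hs
    obtain ⟨im, him, rfl⟩ := List.mem_map.mp hmmem
    rw [hBval]
    have hget : PySem.List.pyGetD (pvCandB caps im :: t) 0 ((0 : Int), (0 : Int), "") =
        pvCandB caps im := by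
      simp [PySem.List.pyGetD, PySem.List.pyGet?, PySem.List.pyIdx?]
    rw [hget]
    -- both are maximal for the (score, index) key, and the index determines the candidate
    have h1 : pvLe2 (pvCandB caps ib) (pvCandB caps im) :=
      hmax _ (List.mem_map_of_mem hib)
    have h2 : pvLe2 (pvCandB caps im) (pvCandB caps ib) :=
      pvLe3_le2 (hallB im him)
    have eim : (pvCandB caps im).2.1 = im := rfl
    have eib : (pvCandB caps ib).2.1 = ib := rfl
    have : im = ib := by unfold pvLe2 at h1 h2; omega
    rw [this]
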